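-- pv_equiv track=rewrite | github.com/jgrebol/ESIpy | esipy/tools.py | find_node_distances
-- ===== SOURCE A (Python) =====
-- from collections import deque, defaultdict
--
-- def find_node_distances(connec):
--    distances = defaultdict(dict)
--
--    for start in connec:
--        queue = deque([(start, 0)])
--        visited = set()
--
--        while queue:
--            cur_node, cur_dist = queue.popleft()
--
--            if cur_node not in visited:
--                visited.add(cur_node)
--                distances[start][cur_node] = cur_dist
--
--                for neighbor in connec[cur_node]:
--                    if neighbor not in visited:
--                        queue.append((neighbor, cur_dist + 1))
--
--    return distances
-- ===== SOURCE B (Python) =====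
-- def find_node_distances(connec):
--     # Naive (Datalog-style) fixpoint: per start, repeatedly expand the whole
--     # reachable list by one adjacency step until it stops growing, keeping the
--     # successive snapshots; a node's distance is the first round it appears in.
--     def dists(start):
--         rounds = [[start]]
--         while True:
--             V = rounds[-1]
--             W = list(V)
--             for u in V:
--                 for v in connec[u]:
--                     if v not in W:
--                         W.append(v)
--             if len(W) == len(V):
--                 break
--             rounds.append(W)
--         dist = {}
--         d = 0
--         for V in rounds:
--             for v in V:
--                 if v not in dist:
--                     dist[v] = d
--             d += 1
--         return dist
--     return {start: dists(start) for start in connec}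
-- ===== Notes on version B (the rewrite author's own statement) =====
-- stated objective: alternative
-- what changed: Replaces A's per-source BFS queue of (node, distance) pairs with pop-time visited-marking by a naive fixpoint iteration: the whole reachable list is re-expanded by one adjacency step each round until it stops growing, and distances are read off afterwards as the first round in which each node appears (no queue, no visited set, no distances carried during the search).
import Mathlib
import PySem

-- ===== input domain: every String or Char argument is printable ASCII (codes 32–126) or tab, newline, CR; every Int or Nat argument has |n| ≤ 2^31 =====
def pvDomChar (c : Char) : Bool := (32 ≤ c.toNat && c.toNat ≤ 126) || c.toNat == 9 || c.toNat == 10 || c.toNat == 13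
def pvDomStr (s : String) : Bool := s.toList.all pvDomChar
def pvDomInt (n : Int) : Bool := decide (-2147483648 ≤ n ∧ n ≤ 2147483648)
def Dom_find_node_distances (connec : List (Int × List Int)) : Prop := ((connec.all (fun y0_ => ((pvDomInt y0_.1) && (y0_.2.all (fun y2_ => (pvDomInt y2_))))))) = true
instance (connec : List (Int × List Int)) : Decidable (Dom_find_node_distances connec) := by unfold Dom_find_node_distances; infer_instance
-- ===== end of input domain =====

-- B replaces A's per-source BFS queue of (node, distance) pairs by a naive fixpoint
-- iteration (re-expand the whole reachable list one adjacency step per round until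
-- stable; distance = first round of appearance); objective: alternative structure.

-- ===== PORT A =====
-- connec[x] : Python dict lookup (KeyError totalized to [] — unreachable under Pre_)
def nbrs (connec : List (Int × List Int)) (x : Int) : List Int :=
  PySem.Dict.getD (PySem.Dict.mk connec) x []

-- ghost universe of all node ids mentioned anywhere; used only for termination
def uni (connec : List (Int × List Int)) : List Int :=
  connec.map Prod.fst ++ connec.flatMap Prod.snd

theorem scontains_iff (s : PySem.Set Int) (x : Int) :
    PySem.Set.contains s x = true ↔ x ∈ s := by
  simp only [PySem.Set.contains]
  exact List.contains_iff_mem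

theorem set_add_fresh (s : PySem.Set Int) (x : Int) (h : x ∉ s) :
    PySem.Set.add s x = s ++ [x] := by
  simp only [PySem.Set.add]
  rw [if_neg]
  rw [scontains_iff]
  exact h

theorem sdiff_erase_fresh (U : List Int) (s : PySem.Set Int) (x : Int) :
    U.toFinset \ (s ++ [x]).toFinset = (U.toFinset \ s.toFinset).erase x := by
  have : (s ++ [x]).toFinset = insert x s.toFinset := by
    ext y; simp
  rw [this, Finset.sdiff_insert]

theorem nbrs_sub (connec : List (Int × List Int)) (x v : Int)
    (hv : v ∈ nbrs connec x) : v ∈ connec.flatMap Prod.snd := by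
  induction connec with
  | nil => simp [nbrs, PySem.Dict.getD, PySem.Dict.get?] at hv
  | cons p rest ih =>
    obtain ⟨k, l⟩ := p
    simp only [nbrs, PySem.Dict.getD_eq_get?_getD, PySem.Dict.get?_mk_cons] at hv ih
    by_cases h : (k == x) = true
    · simp [h] at hv
      exact List.mem_flatMap.mpr ⟨(k, l), List.mem_cons_self .., hv⟩
    · rw [if_neg h] at hv
      simp only [List.flatMap_cons, List.mem_append]
      exact Or.inr (ih hv)

-- A's BFS loop: pop (cur, d); dedup at pop; push unvisited neighbours at d+1.
-- The 'cur ∈ uni connec' test is a termination guard only: every node that can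
-- ever be enqueued from the real initial state is in 'uni connec'.
def loopA (connec : List (Int × List Int)) (queue : List (Int × Int))
    (vis : PySem.Set Int) (dist : PySem.Dict Int Int) : PySem.Dict Int Int :=
  match queue with
  | [] => dist
  | (cur, d) :: q =>
    if vis.contains cur then loopA connec q vis dist
    else if hU : cur ∈ uni connec then
      loopA connec
        (q ++ ((nbrs connec cur).filter (fun n => !(PySem.Set.add vis cur).contains n)).map (fun n => (n, d + 1)))
        (PySem.Set.add vis cur) (dist.insert cur d)
    else dist
  termination_by (((uni connec).toFinset \ vis.toFinset).card, queue.length)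
  decreasing_by
  · apply Prod.Lex.right
    simp
  · apply Prod.Lex.left
    rename_i hc
    have hnv : cur ∉ vis := by
      intro hm
      exact hc ((scontains_iff vis cur).mpr hm)
    rw [set_add_fresh vis cur hnv, sdiff_erase_fresh]
    apply Finset.card_erase_lt_of_mem
    simp [hU, hnv]

def find_node_distances (connec : List (Int × List Int)) : List (Int × List (Int × Int)) :=
  (connec.foldl
      (fun dists p => dists.insert p.1 (loopA connec [(p.1, 0)] PySem.Set.empty PySem.Dict.empty))
      PySem.Dict.empty).items.map (fun q => (q.1, PySem.Dict.items q.2))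

-- ===== PORT B =====
-- B's one-step closure of the whole list V:
-- 'W = list(V); for u in V: for v in connec[u]: if v not in W: W.append(v)'
def stepB (connec : List (Int × List Int)) (V : List Int) : List Int :=
  V.foldl (fun W u => (nbrs connec u).foldl
      (fun W2 v => if W2.contains v then W2 else W2 ++ [v]) W) V

-- The next definitions/lemmas up to roundsB_meas exist only so that roundsB's
-- termination proof can cite roundsB_meas by name.
-- first occurrences of R that are not yet in vis
def sf (vis : PySem.Set Int) (R : List Int) : List Int :=
  match R with
  | [] => []
  | x :: xs => if vis.contains x then sf vis xs else x :: sf (vis.add x) xs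

theorem sf_mem (vis : PySem.Set Int) (R : List Int) (x : Int) (hx : x ∈ sf vis R) :
    x ∈ R ∧ x ∉ vis := by
  induction R generalizing vis with
  | nil => simp [sf] at hx
  | cons y ys ih =>
    rw [sf] at hx
    by_cases hc : PySem.Set.contains vis y = true
    · rw [if_pos hc] at hx
      have := ih vis hx
      exact ⟨List.mem_cons_of_mem _ this.1, this.2⟩
    · rw [if_neg hc] at hx
      have hny : y ∉ vis := fun hm => hc ((scontains_iff vis y).mpr hm)
      rcases List.mem_cons.mp hx with hx | hx
      · subst hx
        exact ⟨List.mem_cons_self .., hny⟩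
      · have := ih (vis.add y) hx
        refine ⟨List.mem_cons_of_mem _ this.1, fun hm => this.2 ?_⟩
        by_cases hc2 : y ∈ vis
        · rw [PySem.Set.add, if_pos ((scontains_iff vis y).mpr hc2)]; exact hm
        · rw [set_add_fresh vis y hc2]; exact List.mem_append_left _ hm

theorem sf_append (vis : PySem.Set Int) (R1 R2 : List Int) :
    sf vis (R1 ++ R2) = sf vis R1 ++ sf (vis ++ sf vis R1) R2 := by
  induction R1 generalizing vis with
  | nil => simp [sf]
  | cons x xs ih =>
    by_cases hc : PySem.Set.contains vis x = true
    · simp only [List.cons_append, sf, if_pos hc]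
      exact ih vis
    · have hnx : x ∉ vis := fun hm => hc ((scontains_iff vis x).mpr hm)
      simp only [List.cons_append, sf, if_neg hc]
      rw [ih (vis.add x), set_add_fresh vis x hnx]
      simp

theorem inner_char (ns : List Int) (W : List Int) :
    ns.foldl (fun W2 v => if W2.contains v then W2 else W2 ++ [v]) W
      = W ++ sf W ns := by
  induction ns generalizing W with
  | nil => simp [sf]
  | cons v vs ih =>
    rw [List.foldl_cons, sf]
    by_cases hc : PySem.Set.contains W v = true
    · have : W.contains v = true := hc
      rw [if_pos hc, if_pos this]
      exact ih W
    · have hnv : v ∉ W := fun hm => hc ((scontains_iff W v).mpr hm)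
      rw [if_neg hc, if_neg (by simpa using hnv)]
      rw [ih (W ++ [v]), set_add_fresh W v hnv]
      simp

theorem stepB_eq_aux (connec : List (Int × List Int)) (L : List Int) (W : List Int) :
    L.foldl (fun W u => (nbrs connec u).foldl
        (fun W2 v => if W2.contains v then W2 else W2 ++ [v]) W) W
      = W ++ sf W (L.flatMap (nbrs connec)) := by
  induction L generalizing W with
  | nil => simp [sf]
  | cons u us ih =>
    rw [List.foldl_cons, inner_char, ih, List.flatMap_cons, sf_append]
    simp

theorem stepB_eq (connec : List (Int × List Int)) (V : List Int) :
    stepB connec V = V ++ sf V (V.flatMap (nbrs connec)) := by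
  exact stepB_eq_aux connec V V

theorem card_sdiff_append_lt (U vis F : List Int) (f : Int)
    (hf : f ∈ F) (hfu : f ∈ U) (hfv : f ∉ vis) :
    (U.toFinset \ (vis ++ F).toFinset).card < (U.toFinset \ vis.toFinset).card := by
  have hsub : U.toFinset \ (vis ++ F).toFinset ⊆ (U.toFinset \ vis.toFinset).erase f := by
    intro y hy
    simp only [Finset.mem_sdiff, List.mem_toFinset, List.mem_append, not_or,
      Finset.mem_erase] at hy ⊢
    refine ⟨fun he => hy.2.2 (he ▸ hf), hy.1, hy.2.1⟩
  have hmem : f ∈ U.toFinset \ vis.toFinset := by simp [hfu, hfv]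
  exact lt_of_le_of_lt (Finset.card_le_card hsub) (Finset.card_erase_lt_of_mem hmem)

theorem mem_uni_of_mem_sf_flatMap (connec : List (Int × List Int))
    (vis : PySem.Set Int) (L : List Int) (f : Int)
    (hf : f ∈ sf vis (L.flatMap (nbrs connec))) : f ∈ uni connec := by
  have h1 := (sf_mem vis _ f hf).1
  obtain ⟨u, _, hu⟩ := List.mem_flatMap.mp h1
  simp only [uni, List.mem_append]
  exact Or.inr (nbrs_sub connec u f hu)

theorem roundsB_meas (connec : List (Int × List Int)) (V : List Int)
    (h : ¬ (stepB connec V).length = V.length) :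
    ((uni connec).toFinset \ (stepB connec V).toFinset).card
      < ((uni connec).toFinset \ V.toFinset).card := by
  rw [stepB_eq] at h ⊢
  have hne : sf V (V.flatMap (nbrs connec)) ≠ [] := by
    intro he
    rw [he] at h
    simp at h
  obtain ⟨f, hf⟩ := List.exists_mem_of_ne_nil _ hne
  exact card_sdiff_append_lt _ _ _ f hf
    (mem_uni_of_mem_sf_flatMap connec V V f hf) (sf_mem V _ f hf).2

-- B's outer loop: successive snapshots until the list stops growing
def roundsB (connec : List (Int × List Int)) (V : List Int) : List (List Int) :=
  if h : (stepB connec V).length = V.length then [V]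
  else V :: roundsB connec (stepB connec V)
  termination_by ((uni connec).toFinset \ V.toFinset).card
  decreasing_by exact roundsB_meas connec V h

-- 'for V in rounds: for v in V: if v not in dist: dist[v] = d; d += 1'
def bdist (rs : List (List Int)) (d : Int) (dist : PySem.Dict Int Int) :
    PySem.Dict Int Int :=
  match rs with
  | [] => dist
  | V :: rest =>
    bdist rest (d + 1)
      (V.foldl (fun dd v => if dd.contains v then dd else dd.insert v d) dist)

def find_node_distances_alt (connec : List (Int × List Int)) : List (Int × List (Int × Int)) :=
  connec.map (fun p =>
    (p.1, (bdist (roundsB connec [p.1]) 0 PySem.Dict.empty).items))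

-- ===== PRECONDITION & SPEC =====
-- Pre_ excludes (i) inputs on which Python A raises KeyError (a listed neighbour that is
-- not itself a key), and (ii) association lists with duplicate keys, which do not represent
-- any Python dict input (the type convention's dict encoding has unique keys).
def Pre_find_node_distances (connec : List (Int × List Int)) : Prop :=
  (connec.map Prod.fst).Nodup ∧
  ∀ p ∈ connec, ∀ v ∈ p.2, v ∈ connec.map Prod.fst
instance (connec : List (Int × List Int)) : Decidable (Pre_find_node_distances connec) := by
  unfold Pre_find_node_distances; infer_instance

def pvWitness_find_node_distances : (List (Int × List Int)) := [(0, [1, 2]), (1, [0]), (2, [2])]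

def Spec_find_node_distances (connec : List (Int × List Int)) (out : List (Int × List (Int × Int))) : Prop := out = find_node_distances_alt connec
instance (connec : List (Int × List Int)) (out : List (Int × List (Int × Int))) : Decidable (Spec_find_node_distances connec out) := by unfold Spec_find_node_distances; infer_instance

-- ===== CLAIM (what is proved, stated in full; the proofs are below) =====
def Claim_equal_find_node_distances : Prop := ∀ (connec : List (Int × List Int)), Dom_find_node_distances connec → Pre_find_node_distances connec → Spec_find_node_distances connec (find_node_distances connec)

-- ===== LEMMAS AND PROOFS =====

theorem contains_append_left (s t : PySem.Set Int) (x : Int)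
    (h : PySem.Set.contains s x = true) : PySem.Set.contains (s ++ t) x = true := by
  rw [scontains_iff] at h ⊢
  exact List.mem_append_left _ h

theorem mem_add (s : PySem.Set Int) (x y : Int) (h : y ∈ PySem.Set.add s x) :
    y ∈ s ∨ y = x := by
  by_cases hc : x ∈ s
  · rw [PySem.Set.add, if_pos ((scontains_iff s x).mpr hc)] at h
    exact Or.inl h
  · rw [set_add_fresh s x hc] at h
    simpa using h

theorem mem_add_self (s : PySem.Set Int) (x : Int) : x ∈ PySem.Set.add s x := by
  by_cases hc : x ∈ s
  · rw [PySem.Set.add, if_pos ((scontains_iff s x).mpr hc)]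
    exact hc
  · rw [set_add_fresh s x hc]
    simp

theorem sf_nodup (vis : PySem.Set Int) (R : List Int) : (sf vis R).Nodup := by
  induction R generalizing vis with
  | nil => simp [sf]
  | cons x xs ih =>
    rw [sf]
    by_cases hc : PySem.Set.contains vis x = true
    · rw [if_pos hc]
      exact ih vis
    · rw [if_neg hc]
      refine List.nodup_cons.mpr ⟨fun hm => ?_, ih (vis.add x)⟩
      exact (sf_mem (vis.add x) xs x hm).2 (mem_add_self vis x)

theorem mem_or_mem_sf (vis : PySem.Set Int) (R : List Int) (x : Int) (hx : x ∈ R) :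
    x ∈ vis ∨ x ∈ sf vis R := by
  induction R generalizing vis with
  | nil => simp at hx
  | cons y ys ih =>
    rw [sf]
    by_cases hc : PySem.Set.contains vis y = true
    · rw [if_pos hc]
      rcases List.mem_cons.mp hx with hx | hx
      · exact Or.inl (hx ▸ (scontains_iff vis y).mp hc)
      · exact ih vis hx
    · rw [if_neg hc]
      rcases List.mem_cons.mp hx with hx | hx
      · exact Or.inr (hx ▸ List.mem_cons_self ..)
      · rcases ih (vis.add y) hx with h | h
        · rcases mem_add vis y x h with h | h
          · exact Or.inl h
          · exact Or.inr (h ▸ List.mem_cons_self ..)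
        · exact Or.inr (List.mem_cons_of_mem _ h)

theorem sf_nil_of_mem (vis : PySem.Set Int) (R : List Int)
    (h : ∀ x ∈ R, x ∈ vis) : sf vis R = [] := by
  induction R with
  | nil => simp [sf]
  | cons x xs ih =>
    rw [sf, if_pos ((scontains_iff vis x).mpr (h x (List.mem_cons_self ..)))]
    exact ih (fun y hy => h y (List.mem_cons_of_mem _ hy))

theorem sf_filter (vis : PySem.Set Int) (ns : List Int) (q : Int → Bool)
    (h : ∀ x ∈ ns, q x = false → PySem.Set.contains vis x = true) :
    sf vis (ns.filter q) = sf vis ns := by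
  induction ns generalizing vis with
  | nil => simp
  | cons x xs ih =>
    by_cases hq : q x = true
    · rw [List.filter_cons_of_pos hq]
      by_cases hc : PySem.Set.contains vis x = true
      · rw [sf, if_pos hc, sf, if_pos hc]
        exact ih vis (fun y hy => h y (List.mem_cons_of_mem _ hy))
      · rw [sf, if_neg hc, sf, if_neg hc]
        congr 1
        refine ih (vis.add x) (fun y hy hqy => ?_)
        have := h y (List.mem_cons_of_mem _ hy) hqy
        rw [scontains_iff] at this ⊢
        by_cases hc2 : x ∈ vis
        · rw [PySem.Set.add, if_pos ((scontains_iff vis x).mpr hc2)]; exact this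
        · rw [set_add_fresh vis x hc2]; exact List.mem_append_left _ this
    · have hq' : q x = false := by simpa using hq
      rw [List.filter_cons_of_neg (by simp [hq'])]
      rw [sf, if_pos (h x (List.mem_cons_self ..) hq')]
      exact ih vis (fun y hy => h y (List.mem_cons_of_mem _ hy))

-- A's processing of one level: fresh nodes in pop order, and the raw pushes
def procL (connec : List (Int × List Int)) (vis : PySem.Set Int) (R : List Int) :
    List Int × List Int :=
  match R with
  | [] => ([], [])
  | x :: xs =>
    if vis.contains x then procL connec vis xs
    else
      let t := procL connec (vis.add x) xs
      (x :: t.1, (nbrs connec x).filter (fun n => !(vis.add x).contains n) ++ t.2)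

theorem procL_fst (connec : List (Int × List Int)) (vis : PySem.Set Int) (R : List Int) :
    (procL connec vis R).1 = sf vis R := by
  induction R generalizing vis with
  | nil => simp [procL, sf]
  | cons x xs ih =>
    rw [procL, sf]
    by_cases hc : PySem.Set.contains vis x = true
    · rw [if_pos hc, if_pos hc]; exact ih vis
    · rw [if_neg hc, if_neg hc]
      simp [ih (vis.add x)]

theorem procL_nil (connec : List (Int × List Int)) (vis : PySem.Set Int) (R : List Int)
    (h : sf vis R = []) : (procL connec vis R).2 = [] := by
  induction R generalizing vis with
  | nil => simp [procL]
  | cons x xs ih =>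
    rw [sf] at h
    rw [procL]
    by_cases hc : PySem.Set.contains vis x = true
    · rw [if_pos hc]
      rw [if_pos hc] at h
      exact ih vis h
    · rw [if_neg hc] at h
      simp at h

theorem procL_snd_sub (connec : List (Int × List Int)) (vis : PySem.Set Int) (R : List Int)
    (y : Int) (hy : y ∈ (procL connec vis R).2) : y ∈ connec.flatMap Prod.snd := by
  induction R generalizing vis with
  | nil => simp [procL] at hy
  | cons x xs ih =>
    rw [procL] at hy
    by_cases hc : PySem.Set.contains vis x = true
    · rw [if_pos hc] at hy
      exact ih vis hy
    · rw [if_neg hc] at hy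
      simp only [List.mem_append] at hy
      rcases hy with hy | hy
      · exact nbrs_sub connec x y (List.mem_of_mem_filter hy)
      · exact ih (vis.add x) hy

theorem sf_procL (connec : List (Int × List Int)) (R : List Int)
    (vis seen : PySem.Set Int)
    (h : ∀ x : Int, (PySem.Set.contains vis x = true ∨ x ∈ sf vis R) →
          PySem.Set.contains seen x = true) :
    sf seen (procL connec vis R).2 = sf seen ((sf vis R).flatMap (nbrs connec)) := by
  induction R generalizing vis seen with
  | nil => simp [procL, sf]
  | cons x xs ih =>
    by_cases hc : PySem.Set.contains vis x = true
    · rw [procL, if_pos hc, sf, if_pos hc]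
      refine ih vis seen (fun y hy => h y ?_)
      rw [sf, if_pos hc]
      exact hy
    · have hnx : x ∉ vis := fun hm => hc ((scontains_iff vis x).mpr hm)
      have hxF : x ∈ sf vis (x :: xs) := by rw [sf, if_neg hc]; exact List.mem_cons_self ..
      rw [procL, if_neg hc]
      rw [sf, if_neg hc]
      simp only [List.flatMap_cons]
      rw [sf_append, sf_append]
      have hfilt : sf seen ((nbrs connec x).filter (fun n => !(PySem.Set.contains (PySem.Set.add vis x) n))) = sf seen (nbrs connec x) := by
        refine sf_filter seen _ _ (fun y hy hqy => ?_)
        simp only [Bool.not_eq_false'] at hqy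
        have hyv := mem_add vis x y ((scontains_iff _ y).mp hqy)
        refine h y ?_
        rcases hyv with hyv | rfl
        · exact Or.inl ((scontains_iff vis y).mpr hyv)
        · exact Or.inr hxF
      rw [hfilt]
      congr 1
      refine ih (vis.add x) (seen ++ sf seen (nbrs connec x)) (fun y hy => ?_)
      refine contains_append_left _ _ _ (h y ?_)
      rcases hy with hy | hy
      · rcases mem_add vis x y ((scontains_iff _ y).mp hy) with hyv | rfl
        · exact Or.inl ((scontains_iff vis y).mpr hyv)
        · exact Or.inr hxF
      · refine Or.inr ?_
        rw [sf, if_neg hc]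
        exact List.mem_cons_of_mem _ hy

theorem loopA_level (connec : List (Int × List Int)) (R N : List Int)
    (vis : PySem.Set Int) (dist : PySem.Dict Int Int) (d : Int)
    (hR : ∀ x ∈ R, x ∈ uni connec) :
    loopA connec (R.map (fun x => (x, d)) ++ N.map (fun x => (x, d + 1))) vis dist
      = loopA connec ((N ++ (procL connec vis R).2).map (fun x => (x, d + 1)))
          (vis ++ (procL connec vis R).1)
          ((procL connec vis R).1.foldl (fun dd x => dd.insert x d) dist) := by
  induction R generalizing N vis dist with
  | nil => simp [procL]
  | cons x xs ih =>
    rw [List.map_cons, List.cons_append, loopA]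
    by_cases hc : PySem.Set.contains vis x = true
    · rw [if_pos hc, procL, if_pos hc]
      exact ih N vis dist (fun y hy => hR y (List.mem_cons_of_mem _ hy))
    · have hU : x ∈ uni connec := hR x (List.mem_cons_self ..)
      have hnx : x ∉ vis := fun hm => hc ((scontains_iff vis x).mpr hm)
      rw [if_neg hc, dif_pos hU, procL, if_neg hc]
      have hq : (xs.map (fun y => (y, d)) ++ N.map (fun y => (y, d + 1)))
            ++ ((nbrs connec x).filter (fun n => !(PySem.Set.contains (PySem.Set.add vis x) n))).map (fun n => (n, d + 1))
          = xs.map (fun y => (y, d))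
            ++ (N ++ (nbrs connec x).filter (fun n => !(PySem.Set.contains (PySem.Set.add vis x) n))).map (fun y => (y, d + 1)) := by
        simp [List.append_assoc]
      rw [hq]
      rw [ih (N ++ (nbrs connec x).filter (fun n => !(PySem.Set.contains (PySem.Set.add vis x) n))) (vis.add x) (dist.insert x d)
          (fun y hy => hR y (List.mem_cons_of_mem _ hy))]
      rw [set_add_fresh vis x hnx]
      simp [List.append_assoc]

-- level-BFS as a proof-only intermediate between loopA and B's fixpoint iteration
def lvl (connec : List (Int × List Int)) (F : List Int) (d : Int)
    (vis : PySem.Set Int) (dist : PySem.Dict Int Int) : PySem.Dict Int Int :=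
  match F with
  | [] => dist
  | u :: us =>
    let F' := sf vis ((u :: us).flatMap (nbrs connec))
    lvl connec F' (d + 1) (vis ++ F')
      (F'.foldl (fun dd x => dd.insert x (d + 1)) dist)
  termination_by (((uni connec).toFinset \ vis.toFinset).card, F.length)
  decreasing_by
    by_cases he : sf vis (List.flatMap (nbrs connec) (u :: us)) = []
    · rw [he]
      apply Prod.Lex.right'
      · simp
      · simp
    · apply Prod.Lex.left
      obtain ⟨f, hf⟩ := List.exists_mem_of_ne_nil _ he
      exact card_sdiff_append_lt _ _ _ f hf
        (mem_uni_of_mem_sf_flatMap connec vis (u :: us) f hf) (sf_mem vis _ f hf).2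

theorem bridgeA (connec : List (Int × List Int)) (k : Nat) :
    ∀ (R : List Int) (vis : PySem.Set Int) (dist : PySem.Dict Int Int) (d : Int),
      (∀ x ∈ R, x ∈ uni connec) →
      (((uni connec).toFinset \ vis.toFinset).card ≤ k) →
      loopA connec (R.map (fun x => (x, d))) vis dist
        = lvl connec (sf vis R) d (vis ++ sf vis R)
            ((sf vis R).foldl (fun dd x => dd.insert x d) dist) := by
  induction k with
  | zero =>
    intro R vis dist d hR hcard
    have hF : sf vis R = [] := by
      by_contra hne
      obtain ⟨f, hf⟩ := List.exists_mem_of_ne_nil _ hne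
      have hfm := sf_mem vis R f hf
      have : f ∈ (uni connec).toFinset \ vis.toFinset := by
        simp [hR f hfm.1, hfm.2]
      have := Finset.card_pos.mpr ⟨f, this⟩
      omega
    rw [hF]
    have h1 := loopA_level connec R [] vis dist d hR
    simp only [List.map_nil, List.append_nil, procL_fst, hF,
      procL_nil connec vis R hF, List.foldl_nil] at h1
    rw [h1, loopA, lvl]
    simp
  | succ k ih =>
    intro R vis dist d hR hcard
    cases hF : sf vis R with
    | nil =>
      have h1 := loopA_level connec R [] vis dist d hR
      simp only [List.map_nil, List.append_nil, procL_fst, hF,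
        procL_nil connec vis R hF, List.foldl_nil] at h1
      rw [h1, loopA, lvl]
      simp
    | cons f F' =>
      have h1 := loopA_level connec R [] vis dist d hR
      simp only [List.map_nil, List.append_nil, List.nil_append, procL_fst, hF] at h1
      rw [h1]
      rw [lvl]
      have hfm := sf_mem vis R f (by rw [hF]; exact List.mem_cons_self ..)
      have hfU : f ∈ uni connec := hR f hfm.1
      have hcard' : ((uni connec).toFinset \ (vis ++ f :: F').toFinset).card ≤ k := by
        have hsub : (uni connec).toFinset \ (vis ++ f :: F').toFinset
            ⊆ ((uni connec).toFinset \ vis.toFinset).erase f := by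
          intro y hy
          simp only [Finset.mem_sdiff, List.mem_toFinset, List.mem_append, List.mem_cons,
            not_or, Finset.mem_erase] at hy ⊢
          exact ⟨hy.2.2.1, hy.1, hy.2.1⟩
        have h2 := Finset.card_le_card hsub
        have hmem : f ∈ (uni connec).toFinset \ vis.toFinset := by
          simp [hfU, hfm.2]
        have h3 := Finset.card_erase_of_mem hmem
        have h4 := Finset.card_pos.mpr ⟨f, hmem⟩
        omega
      have hsub2 : ∀ x ∈ (procL connec vis R).2, x ∈ uni connec := by
        intro y hy
        simp only [uni, List.mem_append]
        exact Or.inr (procL_snd_sub connec vis R y hy)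
      have hmain := ih (procL connec vis R).2 (vis ++ f :: F')
        ((f :: F').foldl (fun dd x => dd.insert x d) dist) (d + 1) hsub2 hcard'
      rw [hmain]
      rw [sf_procL connec R (vis) (vis ++ f :: F')
        (fun y hy => by
          rw [scontains_iff]
          rcases hy with hy | hy
          · exact List.mem_append_left _ ((scontains_iff vis y).mp hy)
          · rw [hF] at hy
            exact List.mem_append_right _ hy)]
      rw [hF]

-- B-side bookkeeping lemmas
theorem contains_foldl_insert (L : List Int) (dist : PySem.Dict Int Int) (c : Int) (v : Int) :
    (L.foldl (fun dd x => dd.insert x c) dist).contains v = true ↔ v ∈ L ∨ dist.contains v = true := by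
  induction L generalizing dist with
  | nil => simp
  | cons x xs ih =>
    rw [List.foldl_cons, ih]
    rw [PySem.Dict.contains_insert]
    constructor
    · rintro (h | h)
      · exact Or.inl (List.mem_cons_of_mem _ h)
      · rcases Bool.or_eq_true_iff.mp h with h | h
        · exact Or.inl (List.mem_cons.mpr (Or.inl (by simpa using h)))
        · exact Or.inr h
    · rintro (h | h)
      · rcases List.mem_cons.mp h with h | h
        · exact Or.inr (Bool.or_eq_true_iff.mpr (Or.inl (by simpa using h)))
        · exact Or.inl h
      · exact Or.inr (Bool.or_eq_true_iff.mpr (Or.inr h))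

theorem foldl_skip (L : List Int) (dist : PySem.Dict Int Int) (c : Int)
    (h : ∀ v ∈ L, dist.contains v = true) :
    L.foldl (fun dd v => if dd.contains v then dd else dd.insert v c) dist = dist := by
  induction L with
  | nil => rfl
  | cons x xs ih =>
    rw [List.foldl_cons, if_pos (h x (List.mem_cons_self ..))]
    exact ih (fun v hv => h v (List.mem_cons_of_mem _ hv))

theorem foldl_fresh (L : List Int) (dist : PySem.Dict Int Int) (c : Int)
    (hN : L.Nodup) (h : ∀ v ∈ L, dist.contains v = false) :
    L.foldl (fun dd v => if dd.contains v then dd else dd.insert v c) dist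
      = L.foldl (fun dd v => dd.insert v c) dist := by
  induction L generalizing dist with
  | nil => rfl
  | cons x xs ih =>
    rw [List.foldl_cons, List.foldl_cons,
      if_neg (by simp [h x (List.mem_cons_self ..)])]
    refine ih (dist.insert x c) (List.nodup_cons.mp hN).2 (fun v hv => ?_)
    rw [PySem.Dict.contains_insert]
    have hne : (v == x) = false := by
      simp only [beq_eq_false_iff_ne, ne_eq]
      intro he
      exact (List.nodup_cons.mp hN).1 (he ▸ hv)
    rw [hne, h v (List.mem_cons_of_mem _ hv)]
    rfl

theorem roundFold_split (P F : List Int) (dist : PySem.Dict Int Int) (c : Int)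
    (hN : (P ++ F).Nodup) (hk : ∀ v, dist.contains v = true ↔ v ∈ P) :
    (P ++ F).foldl (fun dd v => if dd.contains v then dd else dd.insert v c) dist
      = F.foldl (fun dd v => dd.insert v c) dist := by
  rw [List.foldl_append]
  rw [foldl_skip P dist c (fun v hv => (hk v).mpr hv)]
  refine foldl_fresh F dist c (List.Nodup.of_append_right hN) (fun v hv => ?_)
  have : v ∉ P := fun hp => (List.disjoint_of_nodup_append hN) hp hv
  have := (hk v)
  by_cases hc : dist.contains v = true
  · exact absurd (this.mp hc) ‹v ∉ P›
  · simpa using hc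

theorem bridgeB (connec : List (Int × List Int)) (k : Nat) :
    ∀ (P F : List Int) (dist : PySem.Dict Int Int) (d : Int),
      (P ++ F).Nodup →
      (∀ x ∈ P ++ F, x ∈ uni connec) →
      (∀ u ∈ P, ∀ v ∈ nbrs connec u, v ∈ P ++ F) →
      (∀ v, dist.contains v = true ↔ v ∈ P) →
      (((uni connec).toFinset \ (P ++ F).toFinset).card ≤ k) →
      bdist (roundsB connec (P ++ F)) d dist
        = lvl connec F d (P ++ F) (F.foldl (fun dd x => dd.insert x d) dist) := by
  induction k with
  | zero =>
    intro P F dist d hN hU hC hk hcard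
    have hP : sf (P ++ F) (P.flatMap (nbrs connec)) = [] := by
      refine sf_nil_of_mem _ _ (fun x hx => ?_)
      obtain ⟨u, hu, hxu⟩ := List.mem_flatMap.mp hx
      exact hC u hu x hxu
    have hstep : stepB connec (P ++ F) = (P ++ F) ++ sf (P ++ F) (F.flatMap (nbrs connec)) := by
      rw [stepB_eq, List.flatMap_append, sf_append, hP]
      simp
    have hF' : sf (P ++ F) (F.flatMap (nbrs connec)) = [] := by
      by_contra hne
      obtain ⟨f, hf⟩ := List.exists_mem_of_ne_nil _ hne
      have : f ∈ (uni connec).toFinset \ (P ++ F).toFinset := by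
        simp only [Finset.mem_sdiff, List.mem_toFinset]
        exact ⟨mem_uni_of_mem_sf_flatMap connec (P ++ F) F f hf, (sf_mem _ _ f hf).2⟩
      have := Finset.card_pos.mpr ⟨f, this⟩
      omega
    rw [hF'] at hstep
    have hlen : (stepB connec (P ++ F)).length = (P ++ F).length := by
      rw [hstep]; simp
    rw [roundsB, dif_pos hlen]
    rw [bdist, bdist, roundFold_split P F dist d hN hk]
    cases F with
    | nil => rw [lvl]
    | cons u us =>
      rw [lvl]
      rw [hF', lvl]
      simp
  | succ k ih =>
    intro P F dist d hN hU hC hk hcard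
    have hP : sf (P ++ F) (P.flatMap (nbrs connec)) = [] := by
      refine sf_nil_of_mem _ _ (fun x hx => ?_)
      obtain ⟨u, hu, hxu⟩ := List.mem_flatMap.mp hx
      exact hC u hu x hxu
    have hstep : stepB connec (P ++ F) = (P ++ F) ++ sf (P ++ F) (F.flatMap (nbrs connec)) := by
      rw [stepB_eq, List.flatMap_append, sf_append, hP]
      simp
    cases hF' : sf (P ++ F) (F.flatMap (nbrs connec)) with
    | nil =>
      rw [hF'] at hstep
      have hlen : (stepB connec (P ++ F)).length = (P ++ F).length := by
        rw [hstep]; simp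
      rw [roundsB, dif_pos hlen]
      rw [bdist, bdist, roundFold_split P F dist d hN hk]
      cases F with
      | nil => rw [lvl]
      | cons u us =>
        rw [lvl]
        rw [hF', lvl]
        simp
    | cons f F'' =>
      have hlen : ¬ (stepB connec (P ++ F)).length = (P ++ F).length := by
        rw [hstep, hF']
        simp
      rw [roundsB, dif_neg hlen]
      rw [bdist]
      rw [roundFold_split P F dist d hN hk]
      have hstep2 : stepB connec (P ++ F) = (P ++ F) ++ (f :: F'') := by
        rw [hstep, hF']
      rw [hstep2]
      have hfm := sf_mem (P ++ F) (F.flatMap (nbrs connec)) f (by rw [hF']; exact List.mem_cons_self ..)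
      have hfU : f ∈ uni connec := mem_uni_of_mem_sf_flatMap connec (P ++ F) F f (by rw [hF']; exact List.mem_cons_self ..)
      -- the new invariants
      have hN2 : ((P ++ F) ++ (f :: F'')).Nodup := by
        rw [← hF']
        refine List.Nodup.append hN (sf_nodup _ _) ?_
        intro x hx hx2
        exact (sf_mem _ _ x hx2).2 hx
      have hU2 : ∀ x ∈ (P ++ F) ++ (f :: F''), x ∈ uni connec := by
        intro x hx
        rcases List.mem_append.mp hx with hx | hx
        · exact hU x hx
        · rw [← hF'] at hx
          exact mem_uni_of_mem_sf_flatMap connec (P ++ F) F x hx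
      have hC2 : ∀ u ∈ P ++ F, ∀ v ∈ nbrs connec u, v ∈ (P ++ F) ++ (f :: F'') := by
        intro u hu v hv
        rcases List.mem_append.mp hu with hu | hu
        · exact List.mem_append_left _ (hC u hu v hv)
        · have hvf : v ∈ F.flatMap (nbrs connec) := List.mem_flatMap.mpr ⟨u, hu, hv⟩
          rcases mem_or_mem_sf (P ++ F) (F.flatMap (nbrs connec)) v hvf with h | h
          · exact List.mem_append_left _ h
          · rw [hF'] at h
            exact List.mem_append_right _ h
      have hk2 : ∀ v, (F.foldl (fun dd x => dd.insert x d) dist).contains v = true ↔ v ∈ P ++ F := by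
        intro v
        rw [contains_foldl_insert, hk v, List.mem_append]
        tauto
      have hcard2 : ((uni connec).toFinset \ ((P ++ F) ++ (f :: F'')).toFinset).card ≤ k := by
        have hlt := card_sdiff_append_lt (uni connec) (P ++ F) (f :: F'') f
          (List.mem_cons_self ..) hfU hfm.2
        omega
      have := ih (P ++ F) (f :: F'') (F.foldl (fun dd x => dd.insert x d) dist) (d + 1)
        hN2 hU2 hC2 hk2 hcard2
      rw [this]
      -- unfold lvl on the RHS: F must be nonempty (otherwise sf = [])
      cases F with
      | nil =>
        rw [sf_nil_of_mem (P ++ []) (List.flatMap (nbrs connec) []) (by simp)] at hF'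
        exact absurd hF' (by simp)
      | cons u us =>
        conv_rhs => rw [lvl]
        rw [hF']

theorem per_start (connec : List (Int × List Int)) (s : Int)
    (hs : s ∈ connec.map Prod.fst) :
    loopA connec [(s, 0)] PySem.Set.empty PySem.Dict.empty
      = bdist (roundsB connec [s]) 0 PySem.Dict.empty := by
  have hsU : s ∈ uni connec := by
    simp only [uni, List.mem_append]
    exact Or.inl hs
  have hA := bridgeA connec ((uni connec).toFinset \ (PySem.Set.empty : PySem.Set Int).toFinset).card
    [s] PySem.Set.empty PySem.Dict.empty 0
    (fun x hx => by
      simp only [List.mem_singleton] at hx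
      exact hx ▸ hsU)
    (le_refl _)
  have hsf : sf PySem.Set.empty [s] = [s] := by
    rw [sf]
    rw [if_neg (by simp [PySem.Set.contains, PySem.Set.empty])]
    simp [sf]
  rw [hsf] at hA
  have hB := bridgeB connec ((uni connec).toFinset \ ([s] : List Int).toFinset).card
    [] [s] PySem.Dict.empty 0
    (by simp)
    (fun x hx => by
      simp only [List.nil_append, List.mem_singleton] at hx
      exact hx ▸ hsU)
    (by simp)
    (fun v => by simp [PySem.Dict.contains_empty])
    (by simp)
  simp only [List.nil_append] at hB
  simp only [List.map_cons, List.map_nil] at hA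
  rw [hA, hB]
  rfl

-- ===== VERDICT (by name: the statement is the Claim_ definition above) =====
theorem find_node_distances_spec : Claim_equal_find_node_distances := by
  intro connec _hdom hpre
  unfold Spec_find_node_distances find_node_distances find_node_distances_alt
  have hfresh : ∀ p ∈ connec, (PySem.Dict.empty : PySem.Dict Int (PySem.Dict Int Int)).contains p.1 = false := by
    intro p _
    simp [PySem.Dict.contains_empty]
  have hnodup : (connec.map (fun p => p.1)).Nodup := hpre.1
  rw [PySem.Dict.items_foldl_insert_fresh connec (fun p => p.1)
      (fun p => loopA connec [(p.1, 0)] PySem.Set.empty PySem.Dict.empty)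
      PySem.Dict.empty hfresh hnodup]
  have hie : (PySem.Dict.empty : PySem.Dict Int (PySem.Dict Int Int)).items = [] := rfl
  rw [hie]
  simp only [List.nil_append, List.map_map]
  refine List.map_congr_left (fun p hp => ?_)
  simp only [Function.comp]
  rw [per_start connec p.1 (List.mem_map.mpr ⟨p, hp, rfl⟩)]
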